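-- pv_equiv track=rewrite | github.com/lennartmoeller/Cookbook | scripts/update_readme.py | update_readme
-- ===== SOURCE A (Python) =====
-- from collections import defaultdict
-- from typing import List, Dict
--
-- def update_readme(recipes: List[Dict[str, str]]) -> str:
--     groups = defaultdict(list)
--     for r in recipes:
--         if r.get("category") == "Rezeptschritte":
--             continue
--         groups[r.get("category", "")].append(r)
--     lines = ["# Kochbuch", ""]
--     for cat in sorted(groups.keys()):
--         heading = f"## {cat}" if cat else "## Uncategorized"
--         lines.append(heading)
--         lines.append("")
--         for r in sorted(groups[cat], key=lambda x: x["name"]):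
--             name = r["name"]
--             emoji = r.get("emoji", "")
--             display = f"{name} {emoji}" if emoji else name
--             path = f"recipes/{cat}/{name}.md" if cat else f"recipes/{name}.md"
--             lines.append(f"- [{display}](<{path}>)")
--         lines.append("")
--     return "\n".join(lines)
-- ===== SOURCE B (Python) =====
-- from typing import List, Dict
--
-- def update_readme(recipes: List[Dict[str, str]]) -> str:
--     kept = [r for r in recipes if r.get("category") != "Rezeptschritte"]
--     kept.sort(key=lambda r: (r.get("category", ""), r["name"]))
--     out = ["# Kochbuch", ""]
--     i, n = 0, len(kept)
--     while i < n:
--         cat = kept[i].get("category", "")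
--         out.append(f"## {cat}" if cat else "## Uncategorized")
--         out.append("")
--         while i < n and kept[i].get("category", "") == cat:
--             r = kept[i]
--             name = r["name"]
--             emoji = r.get("emoji", "")
--             display = f"{name} {emoji}" if emoji else name
--             path = f"recipes/{cat}/{name}.md" if cat else f"recipes/{name}.md"
--             out.append(f"- [{display}](<{path}>)")
--             i += 1
--         out.append("")
--     return "\n".join(out)
-- ===== Notes on version B (the rewrite author's own statement) =====
-- stated objective: alternative
-- what changed: B drops A's defaultdict grouping and per-category name-sorts: it filters once, sorts the whole list once by the (category, name) key, and emits the markdown blocks in a single run-detecting pass over the sorted list.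
import Mathlib
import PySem

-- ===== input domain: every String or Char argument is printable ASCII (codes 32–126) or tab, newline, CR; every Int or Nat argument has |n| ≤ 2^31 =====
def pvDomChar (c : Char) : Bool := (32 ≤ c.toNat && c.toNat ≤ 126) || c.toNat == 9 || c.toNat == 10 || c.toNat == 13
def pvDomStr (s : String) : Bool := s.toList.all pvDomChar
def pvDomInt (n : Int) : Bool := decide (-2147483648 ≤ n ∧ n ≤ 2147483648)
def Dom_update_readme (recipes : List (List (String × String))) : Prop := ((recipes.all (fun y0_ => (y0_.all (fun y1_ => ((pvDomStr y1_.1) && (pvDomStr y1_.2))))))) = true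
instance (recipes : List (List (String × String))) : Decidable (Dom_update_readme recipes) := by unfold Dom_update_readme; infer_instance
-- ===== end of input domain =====

-- B builds one flat list sorted once by (category, name) and emits the blocks in a single
-- run-detecting pass, instead of A's defaultdict grouping with a per-category sort (objective: alternative).

-- shared accessors: Python r.get(k) on the recipe dict, and the line builders both programs share
def rget? (r : List (String × String)) (k : String) : Option String :=
  (PySem.Dict.ofList r).get? k

def catOf (r : List (String × String)) : String := (rget? r "category").getD ""

-- r["name"]; total form used under Pre_update_readme (Python raises KeyError when "name" is missing)
def nameOf (r : List (String × String)) : String := (rget? r "name").getD ""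

def headingOf (c : String) : String := if c ≠ "" then "## " ++ c else "## Uncategorized"

def bulletOf (c : String) (r : List (String × String)) : String :=
  let name := nameOf r
  let emoji := (rget? r "emoji").getD ""
  let display := if emoji ≠ "" then name ++ " " ++ emoji else name
  let path := if c ≠ "" then "recipes/" ++ c ++ "/" ++ name ++ ".md" else "recipes/" ++ name ++ ".md"
  "- [" ++ display ++ "](<" ++ path ++ ">)"

-- ===== PORT A =====
def update_readme (recipes : List (List (String × String))) : String :=
  let groups := recipes.foldl (fun g r =>
    if rget? r "category" == some "Rezeptschritte" then g
    else g.modify (catOf r) [] (fun l => l ++ [r])) PySem.Dict.empty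
  let lines := (PySem.List.sorted groups.keys (fun c => c)).foldl (fun lines cat =>
    let lines := lines ++ [headingOf cat] ++ [""]
    let lines := (PySem.List.sorted (groups.getD cat []) (fun r => nameOf r)).foldl
      (fun lines r => lines ++ [bulletOf cat r]) lines
    lines ++ [""]) ["# Kochbuch", ""]
  PySem.Str.join "\n" lines

-- ===== PORT B =====
def keepR (r : List (String × String)) : Bool := !(rget? r "category" == some "Rezeptschritte")

-- the outer while loop of B: peel one category run off the sorted list, emit its block
def emitRuns : List (List (String × String)) → List String
  | [] => []
  | r :: rest =>
    let c := catOf r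
    let run := List.takeWhile (fun s => catOf s == c) (r :: rest)
    let rest' := List.dropWhile (fun s => catOf s == c) (r :: rest)
    [headingOf c, ""] ++ run.map (bulletOf c) ++ [""] ++ emitRuns rest'
termination_by l => l.length
decreasing_by
  simp only [List.dropWhile]
  simp only [catOf, beq_self_eq_true]
  exact Nat.lt_succ_of_le (List.length_dropWhile_le _ _)

def update_readme_alt (recipes : List (List (String × String))) : String :=
  let kept := recipes.filter keepR
  let srt := PySem.List.sorted2 kept (fun r => catOf r) (fun r => nameOf r)
  PySem.Str.join "\n" (["# Kochbuch", ""] ++ emitRuns srt)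

-- ===== PRECONDITION & SPEC =====
-- Pre_ excludes exactly the inputs where Python A raises KeyError: a recipe that is kept
-- (category ≠ "Rezeptschritte") but has no "name" key.
def Pre_update_readme (recipes : List (List (String × String))) : Prop :=
  ∀ r ∈ recipes, keepR r = true → (PySem.Dict.ofList r).contains "name" = true
instance (recipes : List (List (String × String))) : Decidable (Pre_update_readme recipes) := by
  unfold Pre_update_readme; infer_instance

def pvWitness_update_readme : (List (List (String × String))) :=
  [[("category", "Desserts"), ("name", "Kuchen"), ("emoji", "x")],
   [("category", "Rezeptschritte")],
   [("name", "Brot")],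
   [("category", "Desserts"), ("name", "Apfel")]]

def Spec_update_readme (recipes : List (List (String × String))) (out : String) : Prop := out = update_readme_alt recipes
instance (recipes : List (List (String × String))) (out : String) : Decidable (Spec_update_readme recipes out) := by unfold Spec_update_readme; infer_instance

-- ===== CLAIM (what is proved, stated in full; the proofs are below) =====
def Claim_equal_update_readme : Prop := ∀ (recipes : List (List (String × String))), Dom_update_readme recipes → Pre_update_readme recipes → Spec_update_readme recipes (update_readme recipes)

-- ===== LEMMAS AND PROOFS =====

-- the lexicographic comparator sorted2 uses on the (category, name) key
def lexB (x y : List (String × String)) : Bool :=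
  decide (catOf x < catOf y) || (!decide (catOf y < catOf x) && decide (nameOf x < nameOf y))

def nameB (x y : List (String × String)) : Bool := decide (nameOf x < nameOf y)

lemma insertBy_append_left {α : Type} (before : α → α → Bool) (x : α) (p t : List α)
    (h : ∀ y ∈ p, before x y = false) :
    PySem.List.insertBy before x (p ++ t) = p ++ PySem.List.insertBy before x t := by
  induction p with
  | nil => simp
  | cons y p ih =>
    simp only [List.cons_append, PySem.List.insertBy, h y (by simp)]
    simp only [Bool.false_eq_true, if_false]
    rw [ih (fun z hz => h z (by simp [hz]))]

lemma insertBy_all_true {α : Type} (before : α → α → Bool) (x : α) (t : List α)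
    (h : ∀ y ∈ t, before x y = true) :
    PySem.List.insertBy before x t = x :: t := by
  cases t with
  | nil => rfl
  | cons y t => simp [PySem.List.insertBy, h y (by simp)]

lemma insertBy_group_step {α : Type} (before before' : α → α → Bool) (x : α) (g t : List α)
    (h : ∀ y ∈ g, before x y = before' x y) (ht : ∀ y ∈ t, before x y = true) :
    PySem.List.insertBy before x (g ++ t) = PySem.List.insertBy before' x g ++ t := by
  induction g with
  | nil => simpa [PySem.List.insertBy] using insertBy_all_true before x t ht
  | cons y g ih =>
    simp only [List.cons_append, PySem.List.insertBy, h y (by simp)]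
    by_cases hb : before' x y = true
    · simp [hb]
    · simp only [eq_false_of_ne_true hb, Bool.false_eq_true, if_false, List.cons_append]
      rw [ih (fun z hz => h z (by simp [hz]))]

lemma insert_grouped (cs : List String) (hcs : cs.Pairwise (· < ·))
    (x : List (String × String)) (hx : catOf x ∈ cs)
    (G : String → List (List (String × String)))
    (hG : ∀ c ∈ cs, ∀ r ∈ G c, catOf r = c) :
    PySem.List.insertBy lexB x (cs.flatMap G) =
      cs.flatMap (fun c => if c = catOf x then PySem.List.insertBy nameB x (G c) else G c) := by
  obtain ⟨s, t, rfl⟩ := List.append_of_mem hx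
  rw [List.pairwise_append] at hcs
  obtain ⟨hps, hpt, hst⟩ := hcs
  have hs : ∀ c ∈ s, c < catOf x := fun c hc => hst c hc _ (by simp)
  have ht : ∀ c ∈ t, catOf x < c := fun c hc => (List.pairwise_cons.mp hpt).1 c hc
  have hGs : ∀ y ∈ s.flatMap G, lexB x y = false := by
    intro y hy
    obtain ⟨c, hc, hyc⟩ := List.mem_flatMap.mp hy
    have hcat := hG c (by simp [hc]) y hyc
    have hlt : catOf y < catOf x := hcat ▸ hs c hc
    have h1 : ¬ catOf x < catOf y := lt_asymm hlt
    simp [lexB, hlt, h1]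
  have hGeq : ∀ y ∈ G (catOf x), lexB x y = nameB x y := by
    intro y hy
    have hcat := hG (catOf x) (by simp) y hy
    simp [lexB, nameB, hcat]
  have hGt : ∀ y ∈ t.flatMap G, lexB x y = true := by
    intro y hy
    obtain ⟨c, hc, hyc⟩ := List.mem_flatMap.mp hy
    have hcat := hG c (by simp [hc]) y hyc
    have hlt : catOf x < catOf y := hcat ▸ ht c hc
    simp [lexB, hlt]
  rw [List.flatMap_append, List.flatMap_cons, insertBy_append_left _ _ _ _ hGs,
    insertBy_group_step lexB nameB x _ _ hGeq hGt,
    List.flatMap_append, List.flatMap_cons, if_pos rfl]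
  have hcongr : s.flatMap (fun c => if c = catOf x then PySem.List.insertBy nameB x (G c) else G c)
      = s.flatMap G := by
    refine List.flatMap_congr (fun c hc => ?_)
    rw [if_neg (ne_of_lt (hs c hc))]
  rw [hcongr]
  have hcongr2 : t.flatMap (fun c => if c = catOf x then PySem.List.insertBy nameB x (G c) else G c)
      = t.flatMap G := by
    refine List.flatMap_congr (fun c hc => ?_)
    rw [if_neg (ne_of_gt (ht c hc))]
  rw [hcongr2]

lemma sorted2_eq_flatMap (kept : List (List (String × String))) :
    PySem.List.sorted2 kept (fun r => catOf r) (fun r => nameOf r) =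
      (PySem.List.sorted (PySem.List.dedup (kept.map catOf)) (fun c => c)).flatMap
        (fun c => PySem.List.sorted (kept.filter (fun r => catOf r == c)) (fun r => nameOf r)) := by
  set cs := PySem.List.sorted (PySem.List.dedup (kept.map catOf)) (fun c => c) with hcsdef
  have hcs : cs.Pairwise (· < ·) := by
    simpa [PySem.List.dedup_eq_ofList] using PySem.List.sorted_ofList_pairwise_lt (kept.map catOf)
  have inv : ∀ (l pref : List (List (String × String))), (∀ r ∈ l, catOf r ∈ cs) →
      l.foldl (fun acc x => PySem.List.insertBy lexB x acc)
        (cs.flatMap (fun c => PySem.List.sorted (pref.filter (fun r => catOf r == c)) (fun r => nameOf r)))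
      = cs.flatMap (fun c => PySem.List.sorted ((pref ++ l).filter (fun r => catOf r == c)) (fun r => nameOf r)) := by
    intro l
    induction l with
    | nil => intro pref _; simp
    | cons x l ih =>
      intro pref hmem
      rw [List.foldl_cons]
      have hGmem : ∀ c ∈ cs, ∀ r ∈ PySem.List.sorted (pref.filter (fun r => catOf r == c)) (fun r => nameOf r), catOf r = c := by
        intro c _ r hr
        have h2 := (PySem.List.mem_sorted _ _ _ _).mp hr
        exact beq_iff_eq.mp (List.of_mem_filter (p := fun r => catOf r == c) h2)
      have hstep : PySem.List.insertBy lexB x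
            (cs.flatMap (fun c => PySem.List.sorted (pref.filter (fun r => catOf r == c)) (fun r => nameOf r)))
          = cs.flatMap (fun c => PySem.List.sorted ((pref ++ [x]).filter (fun r => catOf r == c)) (fun r => nameOf r)) := by
        rw [insert_grouped cs hcs x (hmem x (by simp)) _ hGmem]
        refine List.flatMap_congr (fun c hc => ?_)
        by_cases hxc : c = catOf x
        · rw [if_pos hxc, List.filter_append]
          have hone : List.filter (fun r => catOf r == c) [x] = [x] := by simp [hxc]
          rw [hone, PySem.List.sorted_eq_foldl_insertBy, PySem.List.sorted_eq_foldl_insertBy,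
            List.foldl_append]
          rfl
        · rw [if_neg hxc, List.filter_append]
          have hnone : List.filter (fun r => catOf r == c) [x] = [] := by
            simp only [List.filter_cons, List.filter_nil]
            rw [if_neg]
            simp only [beq_iff_eq]
            exact fun h => hxc h.symm
          rw [hnone, List.append_nil]
      rw [hstep, ih (pref ++ [x]) (fun r hr => hmem r (by simp [hr])), List.append_assoc,
        List.singleton_append]
  have hmemcs : ∀ r ∈ kept, catOf r ∈ cs := by
    intro r hr
    rw [hcsdef, PySem.List.mem_sorted, PySem.List.mem_dedup]
    exact List.mem_map_of_mem hr
  have h0 : cs.flatMap (fun c => PySem.List.sorted ((([]:List (List (String × String)))).filter (fun r => catOf r == c)) (fun r => nameOf r)) = [] := by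
    simp [PySem.List.sorted]
  have := inv kept [] hmemcs
  rw [h0] at this
  rw [show PySem.List.sorted2 kept (fun r => catOf r) (fun r => nameOf r)
      = kept.foldl (fun acc x => PySem.List.insertBy lexB x acc) [] from rfl]
  simpa using this

lemma splitRun_append {α : Type} (p : α → Bool) (l t : List α)
    (hl : ∀ y ∈ l, p y = true) (ht : ∀ y ∈ t, p y = false) :
    (l ++ t).takeWhile p = l ∧ (l ++ t).dropWhile p = t := by
  induction l with
  | nil =>
    cases t with
    | nil => simp
    | cons y t' => simp [ht y (by simp)]
  | cons y l ih =>
    have := ih (fun z hz => hl z (by simp [hz]))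
    simp [hl y (by simp), this.1, this.2]

lemma emitRuns_flatMap (cs : List String) (hcs : cs.Pairwise (· < ·))
    (G : String → List (List (String × String)))
    (hne : ∀ c ∈ cs, G c ≠ [])
    (hG : ∀ c ∈ cs, ∀ r ∈ G c, catOf r = c) :
    emitRuns (cs.flatMap G) =
      cs.flatMap (fun c => [headingOf c, ""] ++ (G c).map (bulletOf c) ++ [""]) := by
  induction cs with
  | nil => simp [emitRuns]
  | cons c cs' ih =>
    rw [List.pairwise_cons] at hcs
    obtain ⟨hlt, hp'⟩ := hcs
    cases hGc : G c with
    | nil => exact absurd hGc (hne c (by simp))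
    | cons r g' =>
      have hcr : catOf r = c := hG c (by simp) r (by simp [hGc])
      have hall : ∀ y ∈ r :: g', (fun s => catOf s == catOf r) y = true := by
        intro y hy
        simp only [beq_iff_eq, hcr]
        exact hG c (by simp) y (by simp [hGc, hy])
      have hnone : ∀ y ∈ cs'.flatMap G, (fun s => catOf s == catOf r) y = false := by
        intro y hy
        obtain ⟨c', hc', hyc'⟩ := List.mem_flatMap.mp hy
        have : catOf y = c' := hG c' (by simp [hc']) y hyc'
        simp only [beq_eq_false_iff_ne, ne_eq, this, hcr]
        exact fun h => absurd (h ▸ hlt c' hc') (lt_irrefl c)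
      have hsplit := splitRun_append (fun s => catOf s == catOf r) (r :: g') (cs'.flatMap G) hall hnone
      rw [List.flatMap_cons, hGc, List.cons_append, emitRuns]
      simp only [← List.cons_append, hsplit.1, hsplit.2]
      rw [hcr, ih hp' (fun c' hc' => hne c' (by simp [hc'])) (fun c' hc' => hG c' (by simp [hc'])),
        List.flatMap_cons, hGc]

lemma groups_fold_eq (recipes : List (List (String × String))) :
    recipes.foldl (fun g r =>
      if rget? r "category" == some "Rezeptschritte" then g
      else g.modify (catOf r) [] (fun l => l ++ [r])) PySem.Dict.empty =
    ((recipes.filter keepR).map (fun r => (catOf r, r))).foldl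
      (fun d p => d.modify p.1 [] (fun l => l ++ [p.2])) PySem.Dict.empty := by
  rw [List.foldl_map, List.foldl_filter]
  apply PySem.List.foldl_congr_mem
  intro acc x _
  by_cases h : rget? x "category" == some "Rezeptschritte" <;> simp [keepR, h]

lemma groups_getD (recipes : List (List (String × String))) (c : String) :
    (recipes.foldl (fun g r =>
      if rget? r "category" == some "Rezeptschritte" then g
      else g.modify (catOf r) [] (fun l => l ++ [r])) PySem.Dict.empty).getD c [] =
      (recipes.filter keepR).filter (fun r => catOf r == c) := by
  rw [groups_fold_eq, PySem.Dict.getD_foldl_modify_append]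
  simp [List.filter_map, Function.comp_def]

lemma groups_keys (recipes : List (List (String × String))) :
    (recipes.foldl (fun g r =>
      if rget? r "category" == some "Rezeptschritte" then g
      else g.modify (catOf r) [] (fun l => l ++ [r])) PySem.Dict.empty).keys =
      PySem.List.dedup ((recipes.filter keepR).map catOf) := by
  rw [groups_fold_eq]
  rw [show ((recipes.filter keepR).map (fun r => (catOf r, r))).foldl
      (fun d p => d.modify p.1 [] (fun l => l ++ [p.2])) PySem.Dict.empty
    = ((recipes.filter keepR).map (fun r => (catOf r, r))).foldl
      (fun d p => d.modify ((fun (p : String × List (String × String)) => p.1) p) []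
        ((fun _ p => (fun l => l ++ [p.2])) d p)) PySem.Dict.empty from rfl]
  rw [PySem.Dict.keys_foldl_modify_key]
  simp [List.map_map, Function.comp_def]
  rfl

-- ===== VERDICT (by name: the statement is the Claim_ definition above) =====
theorem update_readme_spec : Claim_equal_update_readme := by
  intro recipes _ _
  show update_readme recipes = update_readme_alt recipes
  simp only [update_readme, update_readme_alt]
  rw [groups_keys recipes]
  have hcs : (PySem.List.sorted (PySem.List.dedup ((recipes.filter keepR).map catOf)) (fun c => c)).Pairwise (· < ·) := by
    simpa [PySem.List.dedup_eq_ofList] using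
      PySem.List.sorted_ofList_pairwise_lt ((recipes.filter keepR).map catOf)
  have hbody : ∀ (lines : List String),
      ∀ c ∈ PySem.List.sorted (PySem.List.dedup ((recipes.filter keepR).map catOf)) (fun c => c),
      ((PySem.List.sorted ((recipes.foldl (fun g r =>
          if rget? r "category" == some "Rezeptschritte" then g
          else g.modify (catOf r) [] (fun l => l ++ [r])) PySem.Dict.empty).getD c [])
          (fun r => nameOf r)).foldl (fun lines r => lines ++ [bulletOf c r])
          (lines ++ [headingOf c] ++ [""])) ++ [""]
        = lines ++ ([headingOf c, ""]
            ++ (PySem.List.sorted ((recipes.filter keepR).filter (fun r => catOf r == c)) (fun r => nameOf r)).map (bulletOf c)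
            ++ [""]) := by
    intro lines c _
    rw [groups_getD, PySem.List.foldl_append_singleton_eq_map]
    simp
  rw [PySem.List.foldl_congr_mem _ _ _ _ hbody, PySem.List.foldl_append_eq_flatMap,
    sorted2_eq_flatMap]
  rw [emitRuns_flatMap _ hcs _ ?hne ?hG]
  case hne =>
    intro c hc
    rw [Ne, PySem.List.sorted_eq_nil_iff]
    have hc' := (PySem.List.mem_dedup _ _).mp ((PySem.List.mem_sorted _ _ _ _).mp hc)
    obtain ⟨r, hr, hrc⟩ := List.mem_map.mp hc'
    exact List.ne_nil_of_mem (List.mem_filter.mpr ⟨hr, by simp [hrc]⟩)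
  case hG =>
    intro c _ r hr
    exact beq_iff_eq.mp (List.of_mem_filter (p := fun r => catOf r == c)
      ((PySem.List.mem_sorted _ _ _ _).mp hr))
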